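-- pv_equiv track=rewrite | github.com/den200x/gui | generalSettingsWindow.py | calculateStandardWaveListModified
-- ===== SOURCE A (Python) =====
-- def calculateStandardWaveListModified(standard_wave_list, domain_min_wvl, domain_max_wvl):
--     mod_list = []
--     for idx, min_wvl in enumerate(domain_min_wvl):
--         max_wvl = domain_max_wvl[idx]
--         for i in standard_wave_list:
--             if(i >= min_wvl and i <= max_wvl):
--                 mod_list.append(i)
--     mod_list = list(set(mod_list))
--     return sorted(mod_list)
-- ===== SOURCE B (Python) =====
-- def _bisect_left(a, x):
--     lo, hi = 0, len(a)
--     while lo < hi: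
--         mid = (lo + hi) // 2
--         if a[mid] < x:
--             lo = mid + 1
--         else:
--             hi = mid
--     return lo
--
--
-- def _bisect_right(a, x):
--     lo, hi = 0, len(a)
--     while lo < hi:
--         mid = (lo + hi) // 2
--         if x < a[mid]:
--             hi = mid
--         else:
--             lo = mid + 1
--     return lo
--
--
-- def calculateStandardWaveListModified(standard_wave_list, domain_min_wvl, domain_max_wvl):
--     waves = sorted(set(standard_wave_list))
--     keep = set()
--     for idx in range(len(domain_min_wvl)):
--         lo = _bisect_left(waves, domain_min_wvl[idx])
--         hi = _bisect_right(waves, domain_max_wvl[idx])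
--         keep.update(range(lo, hi))
--     return [w for k, w in enumerate(waves) if k in keep]
-- ===== Notes on version B (the rewrite author's own statement) =====
-- stated objective: faster
-- what changed: B sorts the distinct waves once and, for each range, binary-searches the two boundary indices and collects the index interval into a set, instead of A's linear scan of every wave per range followed by dedup and a final sort of the multiset.
import Mathlib
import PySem

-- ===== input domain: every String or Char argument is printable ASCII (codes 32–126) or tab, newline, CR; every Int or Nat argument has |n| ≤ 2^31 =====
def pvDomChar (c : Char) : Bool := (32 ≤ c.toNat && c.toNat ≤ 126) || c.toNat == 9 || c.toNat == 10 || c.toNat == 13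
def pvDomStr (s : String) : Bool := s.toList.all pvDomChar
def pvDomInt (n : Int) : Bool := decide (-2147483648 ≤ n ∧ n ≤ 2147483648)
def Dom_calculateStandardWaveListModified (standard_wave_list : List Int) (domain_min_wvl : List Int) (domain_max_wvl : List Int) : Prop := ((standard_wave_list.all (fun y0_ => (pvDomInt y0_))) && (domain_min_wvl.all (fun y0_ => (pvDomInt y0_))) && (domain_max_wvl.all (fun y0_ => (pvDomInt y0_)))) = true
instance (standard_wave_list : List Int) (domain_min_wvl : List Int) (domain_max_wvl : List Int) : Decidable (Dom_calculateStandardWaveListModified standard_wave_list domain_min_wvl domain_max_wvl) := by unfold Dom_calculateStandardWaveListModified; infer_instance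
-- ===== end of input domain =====

-- B sorts the distinct waves once and binary-searches each range's boundary
-- indices, collecting index ranges into a set, instead of A's linear scan of
-- all waves for every range; return values proved equal under Pre_.

-- ===== PORT A =====
-- 'domain_max_wvl[idx]' raises IndexError when idx is out of range; under
-- Pre_ the index is always in range, so '.getD 0' is never taken as a default.
def calculateStandardWaveListModified (standard_wave_list : List Int) (domain_min_wvl : List Int) (domain_max_wvl : List Int) : List Int :=
  let mod_list := (PySem.List.enumerate domain_min_wvl 0).foldl (fun acc p =>
    let max_wvl := (PySem.List.pyGet? domain_max_wvl p.1).getD 0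
    standard_wave_list.foldl (fun acc2 i =>
      if p.2 ≤ i ∧ i ≤ max_wvl then acc2 ++ [i] else acc2) acc) []
  PySem.List.sorted (PySem.Set.ofList mod_list) (fun x => x) false

-- ===== PORT B =====
-- hand-written _bisect_left from Source B; 'a[mid]' is always in range on the
-- calls made (0 ≤ lo ≤ mid < hi ≤ len a), so '.getD 0' is never taken.
def pvBisectLeftLoop (a : List Int) (x : Int) : Nat → Int → Int → Int
  | 0, lo, _ => lo
  | fuel + 1, lo, hi =>
    if lo < hi then
      let mid := PySem.Int.floordiv (lo + hi) 2
      if (PySem.List.pyGet? a mid).getD 0 < x then pvBisectLeftLoop a x fuel (mid + 1) hi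
      else pvBisectLeftLoop a x fuel lo mid
    else lo

def pvBisectLeft (a : List Int) (x : Int) : Int :=
  pvBisectLeftLoop a x a.length 0 a.length

-- hand-written _bisect_right from Source B
def pvBisectRightLoop (a : List Int) (x : Int) : Nat → Int → Int → Int
  | 0, lo, _ => lo
  | fuel + 1, lo, hi =>
    if lo < hi then
      let mid := PySem.Int.floordiv (lo + hi) 2
      if x < (PySem.List.pyGet? a mid).getD 0 then pvBisectRightLoop a x fuel lo mid
      else pvBisectRightLoop a x fuel (mid + 1) hi
    else lo

def pvBisectRight (a : List Int) (x : Int) : Int :=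
  pvBisectRightLoop a x a.length 0 a.length

def calculateStandardWaveListModified_alt (standard_wave_list : List Int) (domain_min_wvl : List Int) (domain_max_wvl : List Int) : List Int :=
  let waves := PySem.List.sorted (PySem.Set.ofList standard_wave_list) (fun x => x) false
  let keep := (PySem.List.pyRange 0 domain_min_wvl.length 1).foldl (fun s idx =>
    let lo := pvBisectLeft waves ((PySem.List.pyGet? domain_min_wvl idx).getD 0)
    let hi := pvBisectRight waves ((PySem.List.pyGet? domain_max_wvl idx).getD 0)
    PySem.Set.update s (PySem.List.pyRange lo hi 1)) PySem.Set.empty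
  ((PySem.List.enumerate waves 0).filter (fun p => PySem.Set.contains keep p.1)).map (fun p => p.2)

-- ===== PRECONDITION & SPEC =====
-- Both A and B index domain_max_wvl[idx] for every idx below len(domain_min_wvl)
-- and raise IndexError when domain_max_wvl is shorter; exactly those inputs are excluded.
def Pre_calculateStandardWaveListModified (standard_wave_list : List Int) (domain_min_wvl : List Int) (domain_max_wvl : List Int) : Prop :=
  domain_min_wvl.length ≤ domain_max_wvl.length
instance (standard_wave_list : List Int) (domain_min_wvl : List Int) (domain_max_wvl : List Int) : Decidable (Pre_calculateStandardWaveListModified standard_wave_list domain_min_wvl domain_max_wvl) := by unfold Pre_calculateStandardWaveListModified; infer_instance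
def pvWitness_calculateStandardWaveListModified : List Int × List Int × List Int := ([3, 1, 5, 1], [0, 4], [2, 9])

def Spec_calculateStandardWaveListModified (standard_wave_list : List Int) (domain_min_wvl : List Int) (domain_max_wvl : List Int) (out : List Int) : Prop := out = calculateStandardWaveListModified_alt standard_wave_list domain_min_wvl domain_max_wvl
instance (standard_wave_list : List Int) (domain_min_wvl : List Int) (domain_max_wvl : List Int) (out : List Int) : Decidable (Spec_calculateStandardWaveListModified standard_wave_list domain_min_wvl domain_max_wvl out) := by unfold Spec_calculateStandardWaveListModified; infer_instance

-- ===== CLAIM (what is proved, stated in full; the proofs are below) =====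
def Claim_equal_calculateStandardWaveListModified : Prop := ∀ (standard_wave_list : List Int) (domain_min_wvl : List Int) (domain_max_wvl : List Int), Dom_calculateStandardWaveListModified standard_wave_list domain_min_wvl domain_max_wvl → Pre_calculateStandardWaveListModified standard_wave_list domain_min_wvl domain_max_wvl → Spec_calculateStandardWaveListModified standard_wave_list domain_min_wvl domain_max_wvl (calculateStandardWaveListModified standard_wave_list domain_min_wvl domain_max_wvl)

-- ===== LEMMAS AND PROOFS =====

-- invariant of the _bisect_left loop on a ≤-sorted list
theorem pvBisectLeftLoop_spec (a : List Int) (x : Int) (hs : a.Pairwise (· ≤ ·)) :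
    ∀ (fuel : Nat) (lo hi : Int), hi - lo ≤ fuel → 0 ≤ lo → lo ≤ hi → hi ≤ a.length →
    (∀ k : Nat, (hk : k < a.length) → (k : Int) < lo → a[k] < x) →
    (∀ k : Nat, (hk : k < a.length) → hi ≤ (k : Int) → x ≤ a[k]) →
    lo ≤ pvBisectLeftLoop a x fuel lo hi ∧ pvBisectLeftLoop a x fuel lo hi ≤ hi ∧
    (∀ k : Nat, (hk : k < a.length) → (k : Int) < pvBisectLeftLoop a x fuel lo hi → a[k] < x) ∧
    (∀ k : Nat, (hk : k < a.length) → pvBisectLeftLoop a x fuel lo hi ≤ (k : Int) → x ≤ a[k]) := by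
  have hmono := List.pairwise_iff_getElem.1 hs
  intro fuel
  induction fuel with
  | zero =>
    intro lo hi hf h0 hlh hhl hbelow habove
    simp only [pvBisectLeftLoop]
    exact ⟨le_refl _, hlh, hbelow, fun k hk hkge => habove k hk (by omega)⟩
  | succ n ih =>
    intro lo hi hf h0 hlh hhl hbelow habove
    simp only [pvBisectLeftLoop]
    by_cases h : lo < hi
    · rw [if_pos h]
      have hmid : lo ≤ PySem.Int.floordiv (lo + hi) 2 ∧ PySem.Int.floordiv (lo + hi) 2 < hi := by
        simp only [PySem.Int.floordiv, Int.fdiv_eq_ediv]; omega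
      set mid := PySem.Int.floordiv (lo + hi) 2 with hmiddef
      have hmidn : mid.toNat < a.length := by omega
      have hval : (PySem.List.pyGet? a mid).getD 0 = a[mid.toNat] := by
        conv_lhs => rw [show mid = ((mid.toNat : Nat) : Int) by omega]
        rw [PySem.List.pyGet?_natCast, List.getElem?_eq_getElem hmidn]; rfl
      by_cases hlt : (PySem.List.pyGet? a mid).getD 0 < x
      · rw [if_pos hlt]
        have hres := ih (mid + 1) hi (by omega) (by omega) (by omega) hhl
          (fun k hk hklt => by
            by_cases hc : (k : Int) < lo
            · exact hbelow k hk hc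
            · have hle : a[k] ≤ a[mid.toNat] := by
                rcases Nat.lt_or_ge k mid.toNat with hl | hg
                · exact hmono k mid.toNat hk hmidn hl
                · have hkeq : k = mid.toNat := by omega
                  subst hkeq; exact le_refl _
              exact lt_of_le_of_lt hle (hval ▸ hlt))
          habove
        exact ⟨by omega, hres.2.1, hres.2.2.1, hres.2.2.2⟩
      · rw [if_neg hlt]
        have hxmid : x ≤ a[mid.toNat] := le_of_not_gt (hval ▸ hlt)
        have hres := ih lo mid (by omega) h0 (by omega) (by omega) hbelow
          (fun k hk hkge => by
            by_cases hc : hi ≤ (k : Int)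
            · exact habove k hk hc
            · have hge : a[mid.toNat] ≤ a[k] := by
                rcases Nat.lt_or_ge mid.toNat k with hl | hg
                · exact hmono mid.toNat k hmidn hk hl
                · have hkeq : k = mid.toNat := by omega
                  subst hkeq; exact le_refl _
              exact le_trans hxmid hge)
        exact ⟨hres.1, by omega, hres.2.2.1, hres.2.2.2⟩
    · rw [if_neg h]
      exact ⟨le_refl _, hlh, hbelow, fun k hk hkge => habove k hk (by omega)⟩

-- invariant of the _bisect_right loop on a ≤-sorted list
theorem pvBisectRightLoop_spec (a : List Int) (x : Int) (hs : a.Pairwise (· ≤ ·)) :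
    ∀ (fuel : Nat) (lo hi : Int), hi - lo ≤ fuel → 0 ≤ lo → lo ≤ hi → hi ≤ a.length →
    (∀ k : Nat, (hk : k < a.length) → (k : Int) < lo → a[k] ≤ x) →
    (∀ k : Nat, (hk : k < a.length) → hi ≤ (k : Int) → x < a[k]) →
    lo ≤ pvBisectRightLoop a x fuel lo hi ∧ pvBisectRightLoop a x fuel lo hi ≤ hi ∧
    (∀ k : Nat, (hk : k < a.length) → (k : Int) < pvBisectRightLoop a x fuel lo hi → a[k] ≤ x) ∧
    (∀ k : Nat, (hk : k < a.length) → pvBisectRightLoop a x fuel lo hi ≤ (k : Int) → x < a[k]) := by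
  have hmono := List.pairwise_iff_getElem.1 hs
  intro fuel
  induction fuel with
  | zero =>
    intro lo hi hf h0 hlh hhl hbelow habove
    simp only [pvBisectRightLoop]
    exact ⟨le_refl _, hlh, hbelow, fun k hk hkge => habove k hk (by omega)⟩
  | succ n ih =>
    intro lo hi hf h0 hlh hhl hbelow habove
    simp only [pvBisectRightLoop]
    by_cases h : lo < hi
    · rw [if_pos h]
      have hmid : lo ≤ PySem.Int.floordiv (lo + hi) 2 ∧ PySem.Int.floordiv (lo + hi) 2 < hi := by
        simp only [PySem.Int.floordiv, Int.fdiv_eq_ediv]; omega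
      set mid := PySem.Int.floordiv (lo + hi) 2 with hmiddef
      have hmidn : mid.toNat < a.length := by omega
      have hval : (PySem.List.pyGet? a mid).getD 0 = a[mid.toNat] := by
        conv_lhs => rw [show mid = ((mid.toNat : Nat) : Int) by omega]
        rw [PySem.List.pyGet?_natCast, List.getElem?_eq_getElem hmidn]; rfl
      by_cases hlt : x < (PySem.List.pyGet? a mid).getD 0
      · rw [if_pos hlt]
        have hres := ih lo mid (by omega) h0 (by omega) (by omega) hbelow
          (fun k hk hkge => by
            by_cases hc : hi ≤ (k : Int)
            · exact habove k hk hc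
            · have hge : a[mid.toNat] ≤ a[k] := by
                rcases Nat.lt_or_ge mid.toNat k with hl | hg
                · exact hmono mid.toNat k hmidn hk hl
                · have hkeq : k = mid.toNat := by omega
                  subst hkeq; exact le_refl _
              exact lt_of_lt_of_le (hval ▸ hlt) hge)
        exact ⟨hres.1, by omega, hres.2.2.1, hres.2.2.2⟩
      · rw [if_neg hlt]
        have hxmid : a[mid.toNat] ≤ x := le_of_not_gt (hval ▸ hlt)
        have hres := ih (mid + 1) hi (by omega) (by omega) (by omega) hhl
          (fun k hk hklt => by
            by_cases hc : (k : Int) < lo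
            · exact hbelow k hk hc
            · have hle : a[k] ≤ a[mid.toNat] := by
                rcases Nat.lt_or_ge k mid.toNat with hl | hg
                · exact hmono k mid.toNat hk hmidn hl
                · have hkeq : k = mid.toNat := by omega
                  subst hkeq; exact le_refl _
              exact le_trans hle hxmid)
          habove
        exact ⟨by omega, hres.2.1, hres.2.2.1, hres.2.2.2⟩
    · rw [if_neg h]
      exact ⟨le_refl _, hlh, hbelow, fun k hk hkge => habove k hk (by omega)⟩

-- for a sorted wave list, an index lies between the two bisection points
-- exactly when its wave lies in the closed range [lov, hiv]
theorem pv_between_bisect (waves : List Int) (hs : waves.Pairwise (· ≤ ·))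
    (lov hiv : Int) (k : Nat) (hk : k < waves.length) :
    (pvBisectLeft waves lov ≤ (k : Int) ∧ (k : Int) < pvBisectRight waves hiv) ↔
      (lov ≤ waves[k] ∧ waves[k] ≤ hiv) := by
  have hl := pvBisectLeftLoop_spec waves lov hs waves.length 0 waves.length (by omega)
    (le_refl _) (Int.natCast_nonneg _) (le_refl _)
    (fun j hj hlt => absurd hlt (by omega))
    (fun j hj hge => absurd hge (by omega))
  have hr := pvBisectRightLoop_spec waves hiv hs waves.length 0 waves.length (by omega)
    (le_refl _) (Int.natCast_nonneg _) (le_refl _)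
    (fun j hj hlt => absurd hlt (by omega))
    (fun j hj hge => absurd hge (by omega))
  rw [show pvBisectLeft waves lov = pvBisectLeftLoop waves lov waves.length 0 waves.length from rfl] at *
  rw [show pvBisectRight waves hiv = pvBisectRightLoop waves hiv waves.length 0 waves.length from rfl] at *
  constructor
  · rintro ⟨hbl, hbr⟩
    exact ⟨hl.2.2.2 k hk hbl, hr.2.2.1 k hk hbr⟩
  · rintro ⟨hlo, hhi⟩
    constructor
    · by_contra hc
      exact absurd (hl.2.2.1 k hk (by omega)) (by omega)
    · by_contra hc
      exact absurd (hr.2.2.2 k hk (by omega)) (by omega)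

-- membership in a fold of set-updates with integer ranges
theorem pv_mem_foldl_update (l : List Int) (F G : Int → Int) (init : PySem.Set Int) (y : Int) :
    y ∈ l.foldl (fun s idx => PySem.Set.update s (PySem.List.pyRange (F idx) (G idx) 1)) init ↔
      y ∈ init ∨ ∃ idx ∈ l, F idx ≤ y ∧ y < G idx := by
  induction l generalizing init with
  | nil => simp
  | cons a t ih =>
    rw [List.foldl_cons, ih]
    simp only [PySem.Set.mem_update, PySem.List.mem_pyRange_one, List.mem_cons]
    constructor
    · rintro ((h | h) | ⟨i, hi, h⟩)
      · exact Or.inl h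
      · exact Or.inr ⟨a, Or.inl rfl, h⟩
      · exact Or.inr ⟨i, Or.inr hi, h⟩
    · rintro (h | ⟨i, (rfl | hi), h⟩)
      · exact Or.inl (Or.inl h)
      · exact Or.inl (Or.inr h)
      · exact Or.inr ⟨i, hi, h⟩

-- membership in A's accumulated mod_list
theorem pv_mem_modlist (swl mins maxs : List Int)
    (hpre : mins.length ≤ maxs.length) (x : Int) :
    x ∈ (PySem.List.enumerate mins 0).foldl (fun acc p =>
        let max_wvl := (PySem.List.pyGet? maxs p.1).getD 0
        swl.foldl (fun acc2 i =>
          if p.2 ≤ i ∧ i ≤ max_wvl then acc2 ++ [i] else acc2) acc) [] ↔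
      x ∈ swl ∧ ∃ (k : Nat) (h1 : k < mins.length) (h2 : k < maxs.length),
        mins[k] ≤ x ∧ x ≤ maxs[k] := by
  have hinner : ∀ (lo hi : Int) (acc : List Int),
      swl.foldl (fun acc2 i => if lo ≤ i ∧ i ≤ hi then acc2 ++ [i] else acc2) acc
        = acc ++ swl.filter (fun i => decide (lo ≤ i) && decide (i ≤ hi)) := by
    intro lo hi acc
    induction swl generalizing acc with
    | nil => simp
    | cons s t ih =>
      by_cases h : lo ≤ s ∧ s ≤ hi
      · simp [List.foldl_cons, h.1, h.2, ih]
      · have hb : (decide (lo ≤ s) && decide (s ≤ hi)) = false := by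
          simp only [Bool.and_eq_false_iff, decide_eq_false_iff_not]
          tauto
        simp [List.foldl_cons, if_neg h, hb, ih]
  have houter : ∀ (l : List (Int × Int)) (acc : List Int),
      l.foldl (fun acc p =>
        let max_wvl := (PySem.List.pyGet? maxs p.1).getD 0
        swl.foldl (fun acc2 i =>
          if p.2 ≤ i ∧ i ≤ max_wvl then acc2 ++ [i] else acc2) acc) acc
        = acc ++ l.flatMap (fun p =>
            swl.filter (fun i => decide (p.2 ≤ i) && decide (i ≤ (PySem.List.pyGet? maxs p.1).getD 0))) := by
    intro l
    induction l with
    | nil => simp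
    | cons q t ih => intro acc; simp [List.foldl_cons, hinner, List.append_assoc, List.flatMap_def]
  rw [houter]
  simp only [List.nil_append, List.mem_flatMap, List.mem_filter,
    PySem.List.mem_enumerate_iff, Bool.and_eq_true, decide_eq_true_eq]
  constructor
  · rintro ⟨p, ⟨k, h1, rfl⟩, hx, hlo, hhi⟩
    have h2 : k < maxs.length := lt_of_lt_of_le h1 hpre
    refine ⟨hx, k, h1, h2, hlo, ?_⟩
    simpa [PySem.List.pyGet?_natCast, List.getElem?_eq_getElem h2] using hhi
  · rintro ⟨hx, k, h1, h2, hlo, hhi⟩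
    refine ⟨((0 : Int) + k, mins[k]), ⟨k, h1, rfl⟩, hx, hlo, ?_⟩
    simpa [PySem.List.pyGet?_natCast, List.getElem?_eq_getElem h2] using hhi

-- ===== VERDICT (by name: the statement is the Claim_ definition above) =====
theorem calculateStandardWaveListModified_spec : Claim_equal_calculateStandardWaveListModified := by
  intro swl mins maxs _ hpre
  unfold Spec_calculateStandardWaveListModified calculateStandardWaveListModified calculateStandardWaveListModified_alt
  have hWlt : (PySem.List.sorted (PySem.Set.ofList swl) (fun x => x) false).Pairwise (· < ·) :=
    PySem.List.sorted_ofList_pairwise_lt swl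
  have hWle : (PySem.List.sorted (PySem.Set.ofList swl) (fun x => x) false).Pairwise (· ≤ ·) :=
    hWlt.imp (fun h => le_of_lt h)
  set W := PySem.List.sorted (PySem.Set.ofList swl) (fun x => x) false with hWdef
  set keep := (PySem.List.pyRange 0 mins.length 1).foldl (fun s idx =>
    let lo := pvBisectLeft W ((PySem.List.pyGet? mins idx).getD 0)
    let hi := pvBisectRight W ((PySem.List.pyGet? maxs idx).getD 0)
    PySem.Set.update s (PySem.List.pyRange lo hi 1)) PySem.Set.empty with hkeepdef
  set B := ((PySem.List.enumerate W 0).filter (fun p => PySem.Set.contains keep p.1)).map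
    (fun p => p.2) with hBdef
  -- membership in the keep index set
  have hmemkeep : ∀ y : Int, y ∈ keep ↔ ∃ idx : Int, (0 ≤ idx ∧ idx < mins.length) ∧
      pvBisectLeft W ((PySem.List.pyGet? mins idx).getD 0) ≤ y ∧
      y < pvBisectRight W ((PySem.List.pyGet? maxs idx).getD 0) := by
    intro y
    rw [hkeepdef, pv_mem_foldl_update (PySem.List.pyRange 0 mins.length 1)
      (fun idx => pvBisectLeft W ((PySem.List.pyGet? mins idx).getD 0))
      (fun idx => pvBisectRight W ((PySem.List.pyGet? maxs idx).getD 0)) PySem.Set.empty y]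
    simp only [PySem.List.mem_pyRange_one, PySem.Set.empty]
    constructor
    · rintro (h | ⟨i, hi, h⟩)
      · simp at h
      · exact ⟨i, hi, h⟩
    · rintro ⟨i, hi, h⟩
      exact Or.inr ⟨i, hi, h⟩
  -- membership in B's output
  have hmemB : ∀ x : Int, x ∈ B ↔ x ∈ swl ∧ ∃ (k : Nat) (h1 : k < mins.length) (h2 : k < maxs.length),
      mins[k] ≤ x ∧ x ≤ maxs[k] := by
    intro x
    rw [hBdef]
    simp only [List.mem_map, List.mem_filter, PySem.List.mem_enumerate_iff, PySem.Set.contains_iff]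
    constructor
    · rintro ⟨p, ⟨⟨k, hk, rfl⟩, hkeep⟩, rfl⟩
      simp only [zero_add] at hkeep
      obtain ⟨idx, ⟨hidx0, hidxlt⟩, hbl, hbr⟩ := (hmemkeep (k : Int)).1 hkeep
      have hidxn : idx.toNat < mins.length := by omega
      have hidxm : idx.toNat < maxs.length := lt_of_lt_of_le hidxn hpre
      have hgmin : (PySem.List.pyGet? mins idx).getD 0 = mins[idx.toNat] := by
        conv_lhs => rw [show idx = ((idx.toNat : Nat) : Int) by omega]
        rw [PySem.List.pyGet?_natCast, List.getElem?_eq_getElem hidxn]; rfl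
      have hgmax : (PySem.List.pyGet? maxs idx).getD 0 = maxs[idx.toNat] := by
        conv_lhs => rw [show idx = ((idx.toNat : Nat) : Int) by omega]
        rw [PySem.List.pyGet?_natCast, List.getElem?_eq_getElem hidxm]; rfl
      rw [hgmin] at hbl; rw [hgmax] at hbr
      have hrange := (pv_between_bisect W hWle mins[idx.toNat] maxs[idx.toNat] k hk).1 ⟨hbl, hbr⟩
      have hxsw : W[k] ∈ swl := by
        have : W[k] ∈ W := List.getElem_mem hk
        simp only [hWdef, PySem.List.mem_sorted, PySem.Set.mem_ofList] at this
        exact this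
      exact ⟨hxsw, idx.toNat, hidxn, hidxm, hrange.1, hrange.2⟩
    · rintro ⟨hx, i, h1, h2, hlo, hhi⟩
      have hxW : x ∈ W := by
        simp only [hWdef, PySem.List.mem_sorted, PySem.Set.mem_ofList]; exact hx
      obtain ⟨k, hk, rfl⟩ := List.mem_iff_getElem.1 hxW
      refine ⟨((0 : Int) + k, W[k]), ⟨⟨k, hk, rfl⟩, ?_⟩, rfl⟩
      simp only [zero_add]
      rw [hmemkeep (k : Int)]
      refine ⟨(i : Int), ⟨Int.natCast_nonneg _, by exact_mod_cast h1⟩, ?_⟩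
      have hgmin : (PySem.List.pyGet? mins (i : Int)).getD 0 = mins[i] := by
        rw [PySem.List.pyGet?_natCast, List.getElem?_eq_getElem h1]; rfl
      have hgmax : (PySem.List.pyGet? maxs (i : Int)).getD 0 = maxs[i] := by
        rw [PySem.List.pyGet?_natCast, List.getElem?_eq_getElem h2]; rfl
      rw [hgmin, hgmax]
      exact (pv_between_bisect W hWle mins[i] maxs[i] k hk).2 ⟨hlo, hhi⟩
  -- B's output is strictly increasing (it is a sublist of the sorted wave list)
  have hpwB : B.Pairwise (· < ·) := by
    have hsub : ((PySem.List.enumerate W 0).filter (fun p => PySem.Set.contains keep p.1)).Sublist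
        (PySem.List.enumerate W 0) := List.filter_sublist
    have hmapsub : B.Sublist ((PySem.List.enumerate W 0).map (fun p => p.2)) := hsub.map _
    rw [PySem.List.map_snd_enumerate] at hmapsub
    exact hWlt.sublist hmapsub
  refine PySem.List.sorted_eq_of_perm_of_pairwise_lt _ _ _ ?_ hpwB
  refine (List.perm_ext_iff_of_nodup hpwB.nodup (PySem.Set.nodup_ofList _)).2 ?_
  intro x
  rw [hmemB, PySem.Set.mem_ofList, pv_mem_modlist swl mins maxs hpre x]
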